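-- pv_equiv track=rewrite | github.com/pjaehyun/TIL | PS/programmers/PCCP 모의고사 2회 1번.py | solution
-- ===== SOURCE A (Python) =====
-- def solution(command):
--     x, y = 0, 0
--     status = ["U", "R", "D", "L"]
--     i = 0
--     for c in command:
--         if c == "G":
--             if status[i] == "U":
--                 y += 1
--             elif status[i] == "D":
--                 y -= 1
--             elif status[i] == "R":
--                 x += 1
--             else:
--                 x -= 1
--         elif c == "B":
--             if status[i] == "U":
--                 y -= 1
--             elif status[i] == "D":
--                 y += 1
--             elif status[i] == "R":
--                 x -= 1
--             else:
--                 x += 1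
--         elif c == "R":
--             i = (i + 1) % 4
--         else:
--             i = (i - 1) % 4
--     return [x, y]
-- ===== SOURCE B (Python) =====
-- def solution(command):
--     # Stage 1: prefix-scan of turns -> heading index (mod 4) before each command.
--     # (any character other than G/B/R counts as a left turn, as in the original)
--     heads = []
--     r = 0
--     for c in command:
--         heads.append(r % 4)
--         if c == "R":
--             r += 1
--         elif c not in ("G", "B"):
--             r -= 1
--     # Stage 2: sum per-command displacements from lookup tables.
--     DX = [0, 1, 0, -1]
--     DY = [1, 0, -1, 0]
--     SIGN = {"G": 1, "B": -1}
--     x = sum(SIGN.get(c, 0) * DX[h] for c, h in zip(command, heads))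
--     y = sum(SIGN.get(c, 0) * DY[h] for c, h in zip(command, heads))
--     return [x, y]
-- ===== Notes on version B (the rewrite author's own statement) =====
-- stated objective: alternative
-- what changed: Replaces A's single-pass walk simulation (position+heading state machine with nested 4-way branches) by two staged passes: a prefix-scan of turns yielding the heading index before each command, then a summation of displacements looked up in DX/DY tables keyed by that heading.
import Mathlib
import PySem

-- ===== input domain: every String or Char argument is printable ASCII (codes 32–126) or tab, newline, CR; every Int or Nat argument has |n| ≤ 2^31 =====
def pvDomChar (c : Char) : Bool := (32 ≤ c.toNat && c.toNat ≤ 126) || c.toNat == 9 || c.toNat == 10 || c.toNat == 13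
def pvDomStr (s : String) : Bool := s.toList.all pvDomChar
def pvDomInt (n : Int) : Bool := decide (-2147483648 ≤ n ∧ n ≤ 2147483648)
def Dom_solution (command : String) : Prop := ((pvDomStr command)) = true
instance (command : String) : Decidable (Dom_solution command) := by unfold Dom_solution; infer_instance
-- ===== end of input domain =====

-- B replaces A's stateful walk simulation by two staged passes: a prefix-scan of turns
-- giving the heading index before each command, then a summation of table-looked-up
-- displacements; same O(n) cost, a different decomposition (simpler per-stage logic).

-- ===== PORT A =====
-- state: (x, y, i); status[i] looked up via PySem.List.pyGet? (i is always 0..3, so the .getD default is never used)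
def solutionStep (st : Int × Int × Int) (c : Char) : Int × Int × Int :=
  let x := st.1; let y := st.2.1; let i := st.2.2
  let status : List String := ["U", "R", "D", "L"]
  if c = 'G' then
    let s := (PySem.List.pyGet? status i).getD ""
    if s = "U" then (x, y + 1, i)
    else if s = "D" then (x, y - 1, i)
    else if s = "R" then (x + 1, y, i)
    else (x - 1, y, i)
  else if c = 'B' then
    let s := (PySem.List.pyGet? status i).getD ""
    if s = "U" then (x, y - 1, i)
    else if s = "D" then (x, y + 1, i)
    else if s = "R" then (x - 1, y, i)
    else (x + 1, y, i)
  else if c = 'R' then (x, y, PySem.Int.mod (i + 1) 4)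
  else (x, y, PySem.Int.mod (i - 1) 4)

def solution (command : String) : List Int :=
  let r := command.toList.foldl solutionStep (0, 0, 0)
  [r.1, r.2.1]

-- ===== PORT B =====
-- stage 1 loop: state (r, heads); heads.append(r % 4), then r updated by the branch
def solutionAltScan (st : Int × List Int) (c : Char) : Int × List Int :=
  let heads := st.2 ++ [PySem.Int.mod st.1 4]
  if c = 'R' then (st.1 + 1, heads)
  else if c = 'G' ∨ c = 'B' then (st.1, heads)   -- 'elif c not in ("G","B")' fell through
  else (st.1 - 1, heads)

-- SIGN.get(c, 0): literal port of the two-entry dict lookup with default 0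
def pvSign (c : Char) : Int := if c = 'G' then 1 else if c = 'B' then -1 else 0
-- DX[h] / DY[h]: h is always 0..3, so the .getD default is never used
def pvDXat (h : Int) : Int := (PySem.List.pyGet? [0, 1, 0, -1] h).getD 0
def pvDYat (h : Int) : Int := (PySem.List.pyGet? [1, 0, -1, 0] h).getD 0

def solution_alt (command : String) : List Int :=
  let heads := (command.toList.foldl solutionAltScan (0, [])).2
  let x := ((command.toList.zip heads).map (fun p => pvSign p.1 * pvDXat p.2)).sum
  let y := ((command.toList.zip heads).map (fun p => pvSign p.1 * pvDYat p.2)).sum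
  [x, y]

-- ===== PRECONDITION & SPEC =====
def Spec_solution (command : String) (out : List Int) : Prop := out = solution_alt command
instance (command : String) (out : List Int) : Decidable (Spec_solution command out) := by unfold Spec_solution; infer_instance

-- ===== CLAIM (what is proved, stated in full; the proofs are below) =====
def Claim_equal_solution : Prop := ∀ (command : String), Dom_solution command → Spec_solution command (solution command)

-- ===== LEMMAS AND PROOFS =====

-- per-command turn increment of B's stage-1 scan
def pvDelta (c : Char) : Int := if c = 'R' then 1 else if c = 'G' ∨ c = 'B' then 0 else -1

-- the heading sequence B's stage-1 scan produces, as a structural recursion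
def pvHeads : List Char → Int → List Int
  | [], _ => []
  | c :: t, r => PySem.Int.mod r 4 :: pvHeads t (r + pvDelta c)

lemma pv_scan_eq : ∀ (l : List Char) (r : Int) (acc : List Int),
    (l.foldl solutionAltScan (r, acc)).2 = acc ++ pvHeads l r
  | [], _, _ => by simp [pvHeads]
  | c :: t, r, acc => by
      by_cases hR : c = 'R' <;> by_cases hG : c = 'G' <;> by_cases hB : c = 'B' <;>
        simp [List.foldl_cons, solutionAltScan, pvHeads, pvDelta, hR, hG, hB,
          pv_scan_eq t, List.append_assoc, sub_eq_add_neg]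

lemma pv_heads_congr : ∀ (l : List Char) (r r' : Int),
    PySem.Int.mod r 4 = PySem.Int.mod r' 4 → pvHeads l r = pvHeads l r'
  | [], _, _, _ => by simp [pvHeads]
  | c :: t, r, r', h0 => by
      have h : r % 4 = r' % 4 := by
        have := h0
        rw [PySem.Int.mod_eq_emod_of_pos (by norm_num), PySem.Int.mod_eq_emod_of_pos (by norm_num)] at this
        exact this
      have h' : PySem.Int.mod (r + pvDelta c) 4 = PySem.Int.mod (r' + pvDelta c) 4 := by
        rw [PySem.Int.mod_eq_emod_of_pos (by norm_num), PySem.Int.mod_eq_emod_of_pos (by norm_num)]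
        omega
      have hm : PySem.Int.mod r 4 = PySem.Int.mod r' 4 := by
        rw [PySem.Int.mod_eq_emod_of_pos (by norm_num), PySem.Int.mod_eq_emod_of_pos (by norm_num)]
        exact h
      simp only [pvHeads]
      rw [hm, pv_heads_congr t _ _ h']

-- B's two sums, expressed over pvHeads
def pvSumX (l : List Char) (r : Int) : Int :=
  ((l.zip (pvHeads l r)).map (fun p => pvSign p.1 * pvDXat p.2)).sum
def pvSumY (l : List Char) (r : Int) : Int :=
  ((l.zip (pvHeads l r)).map (fun p => pvSign p.1 * pvDYat p.2)).sum

-- final heading index of A's fold (always 0..3)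
def pvEnd : List Char → Int → Int
  | [], i => i
  | c :: t, i => pvEnd t (PySem.Int.mod (i + pvDelta c) 4)

-- invariant: A's fold from heading index i is exactly B's staged sums from heading i
lemma pv_fold : ∀ (l : List Char) (x y i : Int), (i = 0 ∨ i = 1 ∨ i = 2 ∨ i = 3) →
    l.foldl solutionStep (x, y, i) = (x + pvSumX l i, y + pvSumY l i, pvEnd l i)
  | [], x, y, i, _ => by simp [pvSumX, pvSumY, pvHeads, pvEnd]
  | c :: t, x, y, i, h => by
      have c04 := pv_heads_congr t 4 0 (by decide)
      have cm1 := pv_heads_congr t (-1) 3 (by decide)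
      rcases h with h | h | h | h <;> subst h <;>
      by_cases hG : c = 'G' <;> by_cases hB : c = 'B' <;> by_cases hR : c = 'R' <;>
      first
        | (rw [hG] at hB; exact absurd hB (by decide))
        | (rw [hG] at hR; exact absurd hR (by decide))
        | (rw [hB] at hR; exact absurd hR (by decide))
        | (simp only [List.foldl_cons, solutionStep, hG, hB, hR];
           simp [PySem.List.pyGet?, PySem.List.pyIdx?];
           all_goals (first
             | rw [pv_fold t _ _ 0 (by norm_num)]
             | rw [pv_fold t _ _ 1 (by norm_num)]
             | rw [pv_fold t _ _ 2 (by norm_num)]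
             | rw [pv_fold t _ _ 3 (by norm_num)]);
           all_goals simp [pvSumX, pvSumY, pvHeads, pvEnd, pvDelta, pvSign, pvDXat, pvDYat, hG, hB, hR,
             List.zip_cons_cons, Prod.mk.injEq, PySem.List.pyGet?, PySem.List.pyIdx?, c04, cm1];
           all_goals (try ring))

-- ===== VERDICT (by name: the statement is the Claim_ definition above) =====
theorem solution_spec : Claim_equal_solution := by
  intro command _
  unfold Spec_solution solution solution_alt
  have h := pv_fold command.toList 0 0 0 (by norm_num)
  have hs := pv_scan_eq command.toList 0 []
  simp only [List.nil_append] at hs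
  simp only [hs, h, pvSumX, pvSumY]
  norm_num
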